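-- pv_equiv track=rewrite | github.com/bilalakil/challenges | codechef/cook83/adacra.py | calc
-- ===== SOURCE A (Python) =====
-- def calc(s):
--     '''
--     Returns an integer.
--     '''
--
--     chars = set(['U', 'D'])
--     grps = {l: 0 for l in chars}
--     cur = ''
--
--     for l in s:
--         if l not in chars or l == cur: continue
--
--         cur = l
--         grps[l] += 1
--
--     return min(grps.values())
-- ===== SOURCE B (Python) =====
-- def calc(s):
--     '''
--     Returns an integer.
--     '''
--
--     f = [c for c in s if c in ('U', 'D')]
--     if not f:
--         return 0
--     runs = 1 + sum(1 for a, b in zip(f, f[1:]) if a != b)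
--     return runs // 2
-- ===== Notes on version B (the rewrite author's own statement) =====
-- stated objective: simpler
-- what changed: Replaces A's per-letter dict/cur bookkeeping with a filter-then-count-transitions pipeline: since U-runs and D-runs alternate, min(u_runs, d_runs) equals (total runs)//2, so B just counts adjacent unequal pairs in the filtered sequence and halves.
import Mathlib
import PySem

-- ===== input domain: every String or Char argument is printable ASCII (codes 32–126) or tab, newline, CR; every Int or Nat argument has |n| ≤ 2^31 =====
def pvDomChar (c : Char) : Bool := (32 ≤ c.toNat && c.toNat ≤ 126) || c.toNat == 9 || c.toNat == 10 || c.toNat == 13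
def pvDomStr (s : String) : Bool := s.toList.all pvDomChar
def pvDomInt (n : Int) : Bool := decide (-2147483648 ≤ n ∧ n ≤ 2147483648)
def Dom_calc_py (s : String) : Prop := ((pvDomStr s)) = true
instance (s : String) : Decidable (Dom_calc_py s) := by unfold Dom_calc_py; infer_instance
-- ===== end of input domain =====

-- B replaces A's per-letter dict/cur bookkeeping with filter + count adjacent transitions + halve (alternating runs make min = runs//2); same cost, simpler.

-- ===== PORT A =====
def calc_py (s : String) : Int :=
  let chars : PySem.Set Char := PySem.Set.ofList ['U', 'D']
  let grps : PySem.Dict Char Int := chars.foldl (fun d l => d.insert l 0) PySem.Dict.empty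
  -- 'cur' starts as '' which equals no single char: modelled as Option Char, none initially
  let st := s.toList.foldl
    (fun (st : PySem.Dict Char Int × Option Char) l =>
      if ¬ (PySem.Set.contains chars l = true) ∨ some l = st.2 then st
      else (st.1.modify l 0 (· + 1), some l))
    (grps, none)
  ((PySem.List.min? st.1.values (fun x => x)).getD 0)

-- ===== PORT B =====
def calc_py_alt (s : String) : Int :=
  let f := s.toList.filter (fun c => c = 'U' ∨ c = 'D')
  if f.isEmpty then 0
  else
    let runs : Int :=
      1 + ((f.zip (PySem.List.slice f (some 1) none)).foldl
            (fun acc p => if p.1 ≠ p.2 then acc + 1 else acc) 0)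
    PySem.Int.floordiv runs 2

-- ===== PRECONDITION & SPEC =====
def Spec_calc_py (s : String) (out : Int) : Prop := out = calc_py_alt s
instance (s : String) (out : Int) : Decidable (Spec_calc_py s out) := by unfold Spec_calc_py; infer_instance

-- ===== CLAIM (what is proved, stated in full; the proofs are below) =====
def Claim_equal_calc_py : Prop := ∀ (s : String), Dom_calc_py s → Spec_calc_py s (calc_py s)

-- ===== LEMMAS AND PROOFS =====

-- number of adjacent unequal pairs ("transitions") in a list
def pvTrans : List Char → Nat
  | a :: b :: r => (if a = b then 0 else 1) + pvTrans (b :: r)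
  | _ => 0

-- the two-key dict A's loop maintains
def pvD2 (u v : Int) : PySem.Dict Char Int := PySem.Dict.mk [('U', u), ('D', v)]

-- A's loop step
def pvStep (st : PySem.Dict Char Int × Option Char) (l : Char) : PySem.Dict Char Int × Option Char :=
  if ¬ (PySem.Set.contains (PySem.Set.ofList ['U', 'D']) l = true) ∨ some l = st.2 then st
  else (st.1.modify l 0 (· + 1), some l)

lemma pvStep_skip (st : PySem.Dict Char Int × Option Char) (l : Char)
    (h : ¬ (l = 'U' ∨ l = 'D')) : pvStep st l = st := by
  unfold pvStep
  rw [if_pos]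
  left
  rw [PySem.Set.contains_iff]
  simp only [PySem.Set.mem_ofList, List.mem_cons]
  tauto

lemma pvFold_filter (l : List Char) : ∀ (st : PySem.Dict Char Int × Option Char),
    l.foldl pvStep st = (l.filter (fun c => c = 'U' ∨ c = 'D')).foldl pvStep st := by
  induction l with
  | nil => intro st; rfl
  | cons a r ih =>
    intro st
    by_cases ha : a = 'U' ∨ a = 'D'
    · rw [List.foldl_cons, List.filter_cons, if_pos (by simpa using ha), List.foldl_cons]
      exact ih _
    · rw [List.foldl_cons, List.filter_cons, if_neg (by simpa using ha), pvStep_skip st a ha]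
      exact ih st

-- A's loop on an all-U/D list, from current letter 'U' or 'D': transitions split as floor/ceil halves
lemma pvLoopA (f : List Char) (hf : ∀ c ∈ f, c = 'U' ∨ c = 'D') :
    ∀ u v : Int,
      (f.foldl pvStep (pvD2 u v, some 'U')
        = (pvD2 (u + (pvTrans ('U' :: f) / 2 : Nat)) (v + ((pvTrans ('U' :: f) + 1) / 2 : Nat)),
            some (f.getLastD 'U')))
    ∧ (f.foldl pvStep (pvD2 u v, some 'D')
        = (pvD2 (u + ((pvTrans ('D' :: f) + 1) / 2 : Nat)) (v + (pvTrans ('D' :: f) / 2 : Nat)),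
            some (f.getLastD 'D'))) := by
  induction f with
  | nil => intro u v; simp [pvTrans]
  | cons a r ih =>
    intro u v
    have hr : ∀ c ∈ r, c = 'U' ∨ c = 'D' := fun c hc => hf c (List.mem_cons_of_mem _ hc)
    rcases hf a (List.mem_cons_self) with haU | haD
    · subst haU
      constructor
      · -- cur = 'U', a = 'U' : skip
        have hstep : pvStep (pvD2 u v, some 'U') 'U' = (pvD2 u v, some 'U') := by
          unfold pvStep; simp
        have ht : pvTrans ('U' :: 'U' :: r) = pvTrans ('U' :: r) := by simp [pvTrans]
        rw [List.foldl_cons, hstep, (ih hr u v).1, ht, List.getLastD_cons]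
      · -- cur = 'D', a = 'U' : transition, u += 1
        have hstep : pvStep (pvD2 u v, some 'D') 'U' = (pvD2 (u + 1) v, some 'U') := by
          unfold pvStep pvD2
          rw [if_neg (by simp)]
          rfl
        have ht : pvTrans ('D' :: 'U' :: r) = 1 + pvTrans ('U' :: r) := by simp [pvTrans]
        rw [List.foldl_cons, hstep, (ih hr (u + 1) v).1, ht, List.getLastD_cons]
        have h2 : u + 1 + ((pvTrans ('U' :: r) / 2 : Nat) : Int)
            = u + (((1 + pvTrans ('U' :: r) + 1) / 2 : Nat) : Int) := by omega
        have h3 : v + (((pvTrans ('U' :: r) + 1) / 2 : Nat) : Int)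
            = v + (((1 + pvTrans ('U' :: r)) / 2 : Nat) : Int) := by omega
        rw [h2, h3]
    · subst haD
      constructor
      · -- cur = 'U', a = 'D' : transition, v += 1
        have hstep : pvStep (pvD2 u v, some 'U') 'D' = (pvD2 u (v + 1), some 'D') := by
          unfold pvStep pvD2
          rw [if_neg (by simp)]
          rfl
        have ht : pvTrans ('U' :: 'D' :: r) = 1 + pvTrans ('D' :: r) := by simp [pvTrans]
        rw [List.foldl_cons, hstep, (ih hr u (v + 1)).2, ht, List.getLastD_cons]
        have h2 : u + (((pvTrans ('D' :: r) + 1) / 2 : Nat) : Int)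
            = u + (((1 + pvTrans ('D' :: r)) / 2 : Nat) : Int) := by omega
        have h3 : v + 1 + ((pvTrans ('D' :: r) / 2 : Nat) : Int)
            = v + (((1 + pvTrans ('D' :: r) + 1) / 2 : Nat) : Int) := by omega
        rw [h2, h3]
      · -- cur = 'D', a = 'D' : skip
        have hstep : pvStep (pvD2 u v, some 'D') 'D' = (pvD2 u v, some 'D') := by
          unfold pvStep; simp
        have ht : pvTrans ('D' :: 'D' :: r) = pvTrans ('D' :: r) := by simp [pvTrans]
        rw [List.foldl_cons, hstep, (ih hr u v).2, ht, List.getLastD_cons]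

-- B's zip-fold counts exactly the transitions
lemma pvZipFold (f : List Char) : ∀ acc : Int,
    (f.zip f.tail).foldl (fun acc p => if p.1 ≠ p.2 then acc + 1 else acc) acc
      = acc + (pvTrans f : Int) := by
  induction f with
  | nil => intro acc; simp [pvTrans]
  | cons a r ih =>
    intro acc
    cases r with
    | nil => simp [pvTrans]
    | cons b t =>
      simp only [List.tail_cons, List.zip_cons_cons, List.foldl_cons]
      have ih' := ih (if a ≠ b then acc + 1 else acc)
      simp only [List.tail_cons] at ih'
      rw [ih']
      by_cases hab : a = b
      · simp [pvTrans, hab]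
      · simp only [pvTrans, ne_eq, hab, not_false_eq_true, if_pos]
        push_cast
        omega

-- ===== VERDICT (by name: the statement is the Claim_ definition above) =====
theorem calc_py_spec : Claim_equal_calc_py := by
  intro s _
  unfold Spec_calc_py calc_py calc_py_alt
  simp only [PySem.List.slice_from_one]
  have hA0 : (PySem.Set.ofList ['U', 'D'] : PySem.Set Char).foldl (fun d l => d.insert l 0)
      PySem.Dict.empty = pvD2 0 0 := by rfl
  rw [hA0]
  have hstep_eq : (fun (st : PySem.Dict Char Int × Option Char) l =>
      if ¬ (PySem.Set.contains (PySem.Set.ofList ['U', 'D']) l = true) ∨ some l = st.2 then st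
      else (st.1.modify l 0 (· + 1), some l)) = pvStep := rfl
  rw [hstep_eq, pvFold_filter]
  set f := s.toList.filter (fun c => c = 'U' ∨ c = 'D') with hfdef
  have hf : ∀ c ∈ f, c = 'U' ∨ c = 'D' := by
    intro c hc
    have := List.of_mem_filter hc
    simpa using this
  cases hfe : f with
  | nil =>
    simp [pvD2, PySem.Dict.values, PySem.List.min?]
  | cons h r =>
    have hr : ∀ c ∈ r, c = 'U' ∨ c = 'D' := by
      intro c hc; exact hf c (hfe ▸ List.mem_cons_of_mem _ hc)
    have hzip := pvZipFold (h :: r) 0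
    have hne : ((h :: r : List Char).isEmpty) = false := rfl
    simp only [hne, Bool.false_eq_true, if_false, List.foldl_cons]
    rw [hzip]
    rcases hf h (hfe ▸ List.mem_cons_self) with hU | hD
    · subst hU
      have h1 : pvStep (pvD2 0 0, (none : Option Char)) 'U' = (pvD2 1 0, some 'U') := by
        unfold pvStep pvD2
        rw [if_neg (by simp)]
        rfl
      rw [h1, (pvLoopA r hr 1 0).1]
      show (PySem.List.min? [((1 : Int) + (pvTrans ('U' :: r) / 2 : Nat)),
              ((0 : Int) + ((pvTrans ('U' :: r) + 1) / 2 : Nat))] (fun x => x)).getD 0 = _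
      rw [PySem.List.min?_id_cons]
      simp only [List.foldl_cons, List.foldl_nil, Option.getD_some]
      rw [PySem.Int.floordiv_eq_ediv_of_pos (by omega), min_def]
      split_ifs <;> omega
    · subst hD
      have h1 : pvStep (pvD2 0 0, (none : Option Char)) 'D' = (pvD2 0 1, some 'D') := by
        unfold pvStep pvD2
        rw [if_neg (by simp)]
        rfl
      rw [h1, (pvLoopA r hr 0 1).2]
      show (PySem.List.min? [((0 : Int) + ((pvTrans ('D' :: r) + 1) / 2 : Nat)),
              ((1 : Int) + (pvTrans ('D' :: r) / 2 : Nat))] (fun x => x)).getD 0 = _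
      rw [PySem.List.min?_id_cons]
      simp only [List.foldl_cons, List.foldl_nil, Option.getD_some]
      rw [PySem.Int.floordiv_eq_ediv_of_pos (by omega), min_def]
      split_ifs <;> omega
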